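-- pv_equiv track=rewrite | github.com/potatowon/codingtest | 프로그래머스/3/12987. 숫자 게임/숫자 게임.py | solution
-- ===== SOURCE A (Python) =====
-- def solution(A, B):
--     answer = 0
--     A.sort()
--     B.sort()
--
--     j = 0
--     for i in range(len(A)):
--         while j < len(B):
--             if B[j] > A[i]:
--                 answer += 1
--                 j += 1
--                 break
--             j += 1
--
--     return answer
-- ===== SOURCE B (Python) =====
-- def solution(A, B):
--     A.sort()
--     B.sort()
--     m = len(B)
--
--     def ok(k):
--         # can the top k of B beat the bottom k of A pairwise?
--         return all(B[m - k + i] > A[i] for i in range(k))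
--
--     lo, hi = 0, min(len(A), m)
--     while lo < hi:
--         mid = (lo + hi + 1) // 2
--         if ok(mid):
--             lo = mid
--         else:
--             hi = mid - 1
--     return lo
-- ===== Notes on version B (the rewrite author's own statement) =====
-- stated objective: alternative
-- what changed: Replaces the greedy two-pointer scan by a binary search on the answer k, checking in one pass whether the k largest elements of sorted B beat the k smallest of sorted A pairwise.
import Mathlib
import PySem

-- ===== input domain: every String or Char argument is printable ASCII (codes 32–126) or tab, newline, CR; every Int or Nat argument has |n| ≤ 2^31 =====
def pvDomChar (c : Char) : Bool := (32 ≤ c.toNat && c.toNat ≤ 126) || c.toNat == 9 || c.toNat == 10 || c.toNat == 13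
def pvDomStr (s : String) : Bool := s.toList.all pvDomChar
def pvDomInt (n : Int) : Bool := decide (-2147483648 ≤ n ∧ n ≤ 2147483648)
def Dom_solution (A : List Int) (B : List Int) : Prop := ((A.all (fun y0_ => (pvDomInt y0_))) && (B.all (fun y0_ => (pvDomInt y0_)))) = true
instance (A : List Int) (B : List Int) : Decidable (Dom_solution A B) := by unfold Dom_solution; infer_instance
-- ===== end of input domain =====

-- B replaces A's greedy two-pointer scan by a binary search on the answer k, testing whether
-- the k largest of sorted B pairwise beat the k smallest of sorted A; same return value.
-- Both A and B sort their arguments in place (the equivalence proved is about the return value;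
-- the mutation is identical).

-- ===== PORT A =====
-- the inner `while j < len(B): …` loop of A, literal: scans B from index j
def pyWhileA (sB : List Int) (a : Int) (ans : Int) (j : Nat) : Int × Nat :=
  if h : j < sB.length then
    if sB.getD j 0 > a then (ans + 1, j + 1)
    else pyWhileA sB a ans (j + 1)
  else (ans, j)
termination_by sB.length - j

def solution (A : List Int) (B : List Int) : Int :=
  let sA := PySem.List.sorted A (fun x => x) false
  let sB := PySem.List.sorted B (fun x => x) false
  -- for i in range(len(A)): value A[i], with state (answer, j)
  (sA.foldl (fun (s : Int × Nat) a => pyWhileA sB a s.1 s.2) (0, 0)).1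

-- ===== PORT B =====
-- `ok(k)`: all(B[m - k + i] > A[i] for i in range(k)) on the sorted lists
def okCheck (sA sB : List Int) (k : Nat) : Bool :=
  (List.range k).all (fun i => sB.getD (sB.length - k + i) 0 > sA.getD i 0)

-- the `while lo < hi:` binary-search loop of Source B
def bsearch (sA sB : List Int) (lo hi : Nat) : Nat :=
  if h : lo < hi then
    let mid := (lo + hi + 1) / 2
    if okCheck sA sB mid then bsearch sA sB mid hi
    else bsearch sA sB lo (mid - 1)
  else lo
termination_by hi - lo
decreasing_by
  · omega
  · omega

def solution_alt (A : List Int) (B : List Int) : Int :=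
  let sA := PySem.List.sorted A (fun x => x) false
  let sB := PySem.List.sorted B (fun x => x) false
  Int.ofNat (bsearch sA sB 0 (min sA.length sB.length))

-- ===== PRECONDITION & SPEC =====
def Spec_solution (A : List Int) (B : List Int) (out : Int) : Prop := out = solution_alt A B
instance (A : List Int) (B : List Int) (out : Int) : Decidable (Spec_solution A B out) := by unfold Spec_solution; infer_instance

-- ===== CLAIM =====
def Claim_equal_solution : Prop := ∀ (A : List Int) (B : List Int), Dom_solution A B → Spec_solution A B (solution A B)

-- ===== LEMMAS AND PROOFS =====

-- canonical greedy match count A's loop computes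
def matchN : List Int → List Int → Nat
  | [], _ => 0
  | _ :: _, [] => 0
  | a :: as, b :: bs => if b > a then 1 + matchN as bs else matchN (a :: as) bs
termination_by as bs => as.length + bs.length

-- one pass of A's inner while, expressed on the suffix of B it scans
def consumeB (a : Int) : List Int → Bool × List Int
  | [] => (false, [])
  | b :: bs => if b > a then (true, bs) else consumeB a bs

theorem matchN_nil_right (as : List Int) : matchN as [] = 0 := by
  cases as <;> simp [matchN]

theorem matchN_cons (a : Int) (as bs : List Int) :
    matchN (a :: as) bs = (if (consumeB a bs).1 then 1 else 0) + matchN as (consumeB a bs).2 := by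
  induction bs with
  | nil => simp [consumeB, matchN_nil_right]
  | cons b bs ih =>
    by_cases h : b > a
    · simp [matchN, consumeB, h]
    · simp [matchN, consumeB, h, ih]

theorem matchN_le_left : ∀ (as bs : List Int), matchN as bs ≤ as.length := by
  intro as bs
  induction bs generalizing as with
  | nil => simp [matchN_nil_right]
  | cons b bs ih =>
    cases as with
    | nil => simp [matchN]
    | cons a as =>
      by_cases h : b > a
      · have := ih as
        simp [matchN, h]; omega
      · have := ih (a :: as)
        simp only [matchN, if_neg h]
        simpa using this

theorem matchN_le_right : ∀ (as bs : List Int), matchN as bs ≤ bs.length := by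
  intro as bs
  induction bs generalizing as with
  | nil => simp [matchN_nil_right]
  | cons b bs ih =>
    cases as with
    | nil => simp [matchN]
    | cons a as =>
      by_cases h : b > a
      · have := ih as
        simp [matchN, h]; omega
      · have := ih (a :: as)
        simp only [matchN, if_neg h, List.length_cons]
        omega

theorem pyWhileA_eq (sB : List Int) (a : Int) :
    ∀ bs j ans, sB.drop j = bs →
      ∃ j', pyWhileA sB a ans j = (ans + (if (consumeB a bs).1 then 1 else 0), j') ∧
        sB.drop j' = (consumeB a bs).2 := by
  intro bs
  induction bs with
  | nil =>
    intro j ans h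
    have hj : sB.length ≤ j := by
      by_contra hc
      rw [Nat.not_le] at hc
      have := List.drop_eq_nil_iff.mp h
      omega
    refine ⟨j, ?_, ?_⟩
    · rw [pyWhileA]
      simp [consumeB, Nat.not_lt.mpr hj]
    · simp [consumeB, h]
  | cons b bs ih =>
    intro j ans h
    have hj : j < sB.length := by
      by_contra hc
      rw [Nat.not_lt] at hc
      have : sB.drop j = [] := List.drop_eq_nil_iff.mpr hc
      simp [this] at h
    have hget : sB.getD j 0 = b := by
      have h0 : (sB.drop j)[0]? = some b := by rw [h]; rfl
      rw [List.getElem?_drop] at h0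
      norm_num at h0
      simp [List.getD, h0]
    have hdrop : sB.drop (j + 1) = bs := by
      have ht : (sB.drop j).tail = bs := by rw [h]; rfl
      rwa [List.tail_drop] at ht
    by_cases hb : b > a
    · refine ⟨j + 1, ?_, ?_⟩
      · rw [pyWhileA, dif_pos hj, hget, if_pos hb]
        simp [consumeB, hb]
      · simp [consumeB, hb, hdrop]
    · obtain ⟨j', h1, h2⟩ := ih (j + 1) ans hdrop
      refine ⟨j', ?_, ?_⟩
      · rw [pyWhileA, dif_pos hj, hget, if_neg hb, h1]
        simp [consumeB, hb]
      · simpa [consumeB, hb] using h2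

theorem loopA_eq (sB : List Int) :
    ∀ (as : List Int) (ans : Int) (j : Nat),
      (as.foldl (fun (s : Int × Nat) a => pyWhileA sB a s.1 s.2) (ans, j)).1
        = ans + (matchN as (sB.drop j) : Int) := by
  intro as
  induction as with
  | nil => intro ans j; simp [matchN]
  | cons a as ih =>
    intro ans j
    obtain ⟨j', h1, h2⟩ := pyWhileA_eq sB a (sB.drop j) j ans rfl
    simp only [List.foldl_cons, h1]
    rw [ih _ j', h2, matchN_cons]
    push_cast
    ring

-- any k passing the pairwise test is at most the greedy count (no sortedness needed)
theorem le_matchN_of_ok :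
    ∀ (bs as : List Int) (k : Nat), k ≤ as.length → k ≤ bs.length →
      (∀ i < k, as.getD i 0 < bs.getD (bs.length - k + i) 0) → k ≤ matchN as bs := by
  intro bs
  induction bs with
  | nil =>
    intro as k _ hkb _
    simp only [List.length_nil, Nat.le_zero] at hkb
    simp [hkb]
  | cons b bs ih =>
    intro as k hka hkb hok
    cases k with
    | zero => omega
    | succ k' =>
      cases as with
      | nil => simp at hka
      | cons a as =>
        by_cases hba : a < b
        · have hrec : k' ≤ matchN as bs := by
            apply ih as k' (by simpa using hka) (by simpa using hkb)
            intro i hi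
            have h := hok (i + 1) (by omega)
            simp only [List.length_cons] at h hkb
            have hidx : bs.length + 1 - (k' + 1) + (i + 1) = (bs.length - k' + i) + 1 := by
              omega
            rw [hidx, List.getD_cons_succ, List.getD_cons_succ] at h
            exact h
          simp only [matchN, if_pos hba]
          omega
        · have hk'b : k' + 1 ≤ bs.length := by
            by_contra hc
            have hk : k' + 1 = bs.length + 1 := by
              simp only [List.length_cons] at hkb; omega
            have h0 := hok 0 (by omega)
            simp only [List.length_cons] at h0
            have hz : bs.length + 1 - (k' + 1) + 0 = 0 := by omega
            rw [hz, List.getD_cons_zero, List.getD_cons_zero] at h0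
            exact hba h0
          have hrec : k' + 1 ≤ matchN (a :: as) bs := by
            apply ih (a :: as) (k' + 1) hka hk'b
            intro i hi
            have h := hok i hi
            simp only [List.length_cons] at h
            have hidx : bs.length + 1 - (k' + 1) + i = (bs.length - (k' + 1) + i) + 1 := by
              omega
            rw [hidx, List.getD_cons_succ] at h
            exact h
          simpa [matchN, if_neg hba] using hrec

-- the greedy count itself passes the pairwise test (uses that B is sorted)
theorem ok_of_matchN :
    ∀ (bs as : List Int), bs.Pairwise (· ≤ ·) →
      ∀ i < matchN as bs, as.getD i 0 < bs.getD (bs.length - matchN as bs + i) 0 := by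
  intro bs
  induction bs with
  | nil => intro as _ i hi; simp [matchN_nil_right] at hi
  | cons b bs ih =>
    intro as hp i hi
    obtain ⟨hb, hp'⟩ := List.pairwise_cons.mp hp
    cases as with
    | nil => simp [matchN] at hi
    | cons a as =>
      by_cases hba : a < b
      · simp only [matchN, if_pos hba] at hi ⊢
        have hf' : matchN as bs ≤ bs.length := matchN_le_right as bs
        cases i with
        | zero =>
          simp only [List.length_cons, List.getD_cons_zero, Nat.add_zero]
          by_cases hfull : matchN as bs = bs.length
          · have hz : bs.length + 1 - (1 + matchN as bs) = 0 := by omega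
            rw [hz, List.getD_cons_zero]
            exact hba
          · have hidx2 : bs.length + 1 - (1 + matchN as bs)
                = (bs.length - matchN as bs - 1) + 1 := by omega
            rw [hidx2, List.getD_cons_succ]
            have hlt : bs.length - matchN as bs - 1 < bs.length := by omega
            have hmem : bs.getD (bs.length - matchN as bs - 1) 0 ∈ bs := by
              rw [List.getD_eq_getElem bs 0 hlt]
              exact List.getElem_mem hlt
            exact lt_of_lt_of_le hba (hb _ hmem)
        | succ j =>
          have hj : j < matchN as bs := by omega
          have h := ih as hp' j hj
          simp only [List.length_cons, List.getD_cons_succ]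
          have hidx : bs.length + 1 - (1 + matchN as bs) + (j + 1)
              = (bs.length - matchN as bs + j) + 1 := by omega
          rw [hidx, List.getD_cons_succ]
          exact h
      · simp only [matchN, if_neg hba] at hi ⊢
        have hf : matchN (a :: as) bs ≤ bs.length := matchN_le_right (a :: as) bs
        have h := ih (a :: as) hp' i hi
        simp only [List.length_cons]
        have hidx : bs.length + 1 - matchN (a :: as) bs + i
            = (bs.length - matchN (a :: as) bs + i) + 1 := by omega
        rw [hidx, List.getD_cons_succ]
        exact h

-- hence okCheck holds at every k below the greedy count (monotonicity via sortedness)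
theorem okCheck_of_le_matchN (sA sB : List Int) (hp : sB.Pairwise (· ≤ ·))
    (k : Nat) (hk : k ≤ matchN sA sB) : okCheck sA sB k = true := by
  have hfB : matchN sA sB ≤ sB.length := matchN_le_right sA sB
  have hmono := List.pairwise_iff_getElem.mp hp
  unfold okCheck
  rw [List.all_eq_true]
  intro i hi
  rw [List.mem_range] at hi
  have h := ok_of_matchN sB sA hp i (by omega)
  have hlt : sB.length - k + i < sB.length := by omega
  have hlt2 : sB.length - matchN sA sB + i < sB.length := by omega
  have hle : sB.length - matchN sA sB + i ≤ sB.length - k + i := by omega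
  have hBmono : sB.getD (sB.length - matchN sA sB + i) 0 ≤ sB.getD (sB.length - k + i) 0 := by
    rw [List.getD_eq_getElem sB 0 hlt2, List.getD_eq_getElem sB 0 hlt]
    rcases Nat.lt_or_ge (sB.length - matchN sA sB + i) (sB.length - k + i) with hlt' | hge
    · exact hmono _ _ hlt2 hlt hlt'
    · have heq : sB.length - matchN sA sB + i = sB.length - k + i := by omega
      simp [heq]
  simp only [decide_eq_true_eq]
  exact lt_of_lt_of_le h hBmono

theorem bsearch_eq (sA sB : List Int) (hp : sB.Pairwise (· ≤ ·)) :
    ∀ (d lo hi : Nat), hi - lo ≤ d → lo ≤ matchN sA sB → matchN sA sB ≤ hi →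
      hi ≤ sA.length → hi ≤ sB.length → bsearch sA sB lo hi = matchN sA sB := by
  intro d
  induction d with
  | zero =>
    intro lo hi hd hlo hhi _ _
    rw [bsearch]
    have : ¬ lo < hi := by omega
    simp [this]
    omega
  | succ d ih =>
    intro lo hi hd hlo hhi hA hB
    rw [bsearch]
    by_cases h : lo < hi
    · simp only [dif_pos h]
      set mid := (lo + hi + 1) / 2 with hmid
      have hm1 : lo < mid := by omega
      have hm2 : mid ≤ hi := by omega
      by_cases hok : okCheck sA sB mid
      · rw [if_pos hok]
        have hmidle : mid ≤ matchN sA sB := by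
          apply le_matchN_of_ok sB sA mid (by omega) (by omega)
          intro i hik
          have := (List.all_eq_true.mp hok) i (List.mem_range.mpr hik)
          simpa using this
        exact ih mid hi (by omega) hmidle hhi hA hB
      · rw [if_neg hok]
        have hflt : matchN sA sB < mid := by
          by_contra hc
          exact hok (okCheck_of_le_matchN sA sB hp mid (by omega))
        exact ih lo (mid - 1) (by omega) hlo (by omega) (by omega) (by omega)
    · simp only [dif_neg h]
      omega

-- ===== VERDICT =====
theorem solution_spec : Claim_equal_solution := by
  intro A B _
  unfold Spec_solution solution solution_alt
  have hp : (PySem.List.sorted B (fun x => x) false).Pairwise (· ≤ ·) := by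
    simpa using PySem.List.sorted_pairwise B (fun x => x)
  rw [loopA_eq _ _ 0 0]
  show (0 : Int) + (matchN (PySem.List.sorted A (fun x => x) false)
      (List.drop 0 (PySem.List.sorted B (fun x => x) false)) : Int)
    = Int.ofNat (bsearch (PySem.List.sorted A (fun x => x) false)
        (PySem.List.sorted B (fun x => x) false) 0
        (min (PySem.List.sorted A (fun x => x) false).length
          (PySem.List.sorted B (fun x => x) false).length))
  rw [bsearch_eq _ _ hp (min (PySem.List.sorted A (fun x => x) false).length
        (PySem.List.sorted B (fun x => x) false).length) 0 _ (by omega) (by omega)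
        (le_min (matchN_le_left _ _) (matchN_le_right _ _)) (by omega) (by omega)]
  simp
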